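-- pv_equiv track=rewrite | github.com/annotatorB/schubert_dances | tools/ms3.py | disambiguate_repeats
-- ===== SOURCE A (Python) =====
-- from collections import defaultdict, Counter
--
-- def a_n_range(c, n):
--     """Generates character `a` and the `n-1` following characters.
--     Parameters
--     ----------
--     c : :obj:`char`
--         Start character.
--     n : :obj:`int`
--         Number of total characters.
--
--     Example
--     -------
--     >>> list(a_n_range('b', 4))
--     ['b', 'c', 'd', 'e']
--     """
--     c = ord(c)
--     for a in range(c, c+n):
--         yield chr(a)
--
-- def disambiguate_repeats(treated):
--     c = Counter(treated)
--     multiples = {k: v for k, v in c.items() if v > 1}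
--     if len(multiples) == 0:
--         return treated
--     else:
--         new_keys = {k: a_n_range('a',v) for k,v in multiples.items()}
--         return [f"{s}{next(new_keys[s])}" if s in new_keys else s for s in treated]
-- ===== SOURCE B (Python) =====
-- def disambiguate_repeats(treated):
--     totals = {}
--     right_rev = []
--     for s in reversed(treated):
--         k = totals.get(s, 0)
--         totals[s] = k + 1
--         right_rev.append(k)
--     right = right_rev[::-1]
--     if all(k == 0 for k in right):
--         return treated
--     return [s + chr(ord('a') + totals[s] - 1 - k) if totals[s] > 1 else s
--             for s, k in zip(treated, right)]
-- ===== Notes on version B (the rewrite author's own statement) =====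
-- stated objective: alternative
-- what changed: A counts with Counter and keeps a dict of per-key suffix generators consumed left to right; B makes one backward pass recording, per position, the number of equal elements to its right plus the final totals, and computes each suffix letter arithmetically as chr(ord('a') + total - 1 - right_count), with no Counter, no filtering dict and no generator state.
import Mathlib
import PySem

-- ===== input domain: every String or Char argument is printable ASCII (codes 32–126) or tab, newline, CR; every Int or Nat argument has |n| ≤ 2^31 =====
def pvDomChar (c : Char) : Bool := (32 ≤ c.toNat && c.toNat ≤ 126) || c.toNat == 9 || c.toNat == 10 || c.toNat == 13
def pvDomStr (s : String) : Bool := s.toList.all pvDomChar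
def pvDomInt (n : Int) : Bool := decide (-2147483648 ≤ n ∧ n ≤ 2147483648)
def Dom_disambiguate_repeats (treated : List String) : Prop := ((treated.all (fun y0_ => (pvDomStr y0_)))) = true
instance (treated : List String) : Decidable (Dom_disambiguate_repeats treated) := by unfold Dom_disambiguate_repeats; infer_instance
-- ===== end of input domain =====

-- B replaces A's Counter + dict-of-generators forward pass by one backward counting pass plus an
-- arithmetic complement (suffix index = total - 1 - occurrences to the right); alternative decomposition, no speed claim.

-- ===== PORT A =====
-- Counter(treated) is PySem.Dict.counter;
-- the dict comprehension {k: v for k, v in c.items() if v > 1} is a fold inserting the filtered items in order;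
-- each generator a_n_range('a', v) only ever yields chr(ord('a')), chr(ord('a')+1), …, so its state is
-- the number of next() calls made so far: the dict of generators is transliterated as a per-key
-- next-call-count dict (exact for every next() A performs; f"{s}{c}" is s ++ c.toString)
def disambiguate_repeats (treated : List String) : List String :=
  let c : PySem.Dict String Int := PySem.Dict.counter treated
  let multiples : PySem.Dict String Int :=
    (c.items.filter (fun kv => kv.2 > 1)).foldl (fun d kv => d.insert kv.1 kv.2) PySem.Dict.empty
  if multiples.size = 0 then treated
  else
    ((treated.foldl
        (fun (st : PySem.Dict String Int × List String) s =>
          if multiples.contains s then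
            (st.1.insert s (st.1.getD s 0 + 1),
             st.2 ++ [s ++ (Char.ofNat ('a'.toNat + (st.1.getD s 0).toNat)).toString])
          else (st.1, st.2 ++ [s]))
        (PySem.Dict.empty, [])).2)

-- ===== PORT B =====
-- backward pass: totals = final per-element counts, right = per-position count of later equal elements;
-- the comprehension labels s with chr(ord('a') + totals[s] - 1 - k) (k = occurrences to the right)
def disambiguate_repeats_alt (treated : List String) : List String :=
  let st := treated.reverse.foldl
      (fun (st : PySem.Dict String Int × List Int) s =>
        (st.1.insert s (st.1.getD s 0 + 1), st.2 ++ [st.1.getD s 0]))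
      (PySem.Dict.empty, [])
  let totals := st.1
  let right := st.2.reverse
  if right.all (fun k => k == 0) then treated
  else
    (treated.zip right).map (fun p =>
      if totals.getD p.1 0 > 1 then
        p.1 ++ (Char.ofNat ('a'.toNat + (totals.getD p.1 0 - 1 - p.2).toNat)).toString
      else p.1)

-- ===== PRECONDITION & SPEC =====
def Spec_disambiguate_repeats (treated : List String) (out : List String) : Prop := out = disambiguate_repeats_alt treated
instance (treated : List String) (out : List String) : Decidable (Spec_disambiguate_repeats treated out) := by unfold Spec_disambiguate_repeats; infer_instance

-- ===== CLAIM (what is proved, stated in full; the proofs are below) =====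
def Claim_equal_disambiguate_repeats : Prop := ∀ (treated : List String), Dom_disambiguate_repeats treated → Spec_disambiguate_repeats treated (disambiguate_repeats treated)

-- ===== LEMMAS AND PROOFS =====

def pvLab (s : String) (k : Nat) : String := s ++ (Char.ofNat ('a'.toNat + k)).toString

def pvEmitA (m : PySem.Dict String Int) : List String → PySem.Dict String Int → List String
  | [], _ => []
  | s :: t, d =>
    (if m.contains s then pvLab s (d.getD s 0).toNat else s)
      :: pvEmitA m t (if m.contains s then d.insert s (d.getD s 0 + 1) else d)

def pvEmitB : List String → PySem.Dict String Int → List Int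
  | [], _ => []
  | s :: t, d => d.getD s 0 :: pvEmitB t (d.insert s (d.getD s 0 + 1))

theorem pvEmitA_length (m : PySem.Dict String Int) (l : List String) (d : PySem.Dict String Int) :
    (pvEmitA m l d).length = l.length := by
  induction l generalizing d with
  | nil => rfl
  | cons s t ih => simp [pvEmitA, ih]

theorem pvEmitB_length (l : List String) (d : PySem.Dict String Int) :
    (pvEmitB l d).length = l.length := by
  induction l generalizing d with
  | nil => rfl
  | cons s t ih => simp [pvEmitB, ih]

theorem pvEmitA_getElem (m : PySem.Dict String Int) (l : List String) (g : String → Nat)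
    (d : PySem.Dict String Int)
    (hd : ∀ s, m.contains s = true → d.getD s 0 = (g s : Int))
    (i : Nat) (h : i < l.length) :
    (pvEmitA m l d)[i]'(by simpa [pvEmitA_length] using h) =
      if m.contains (l[i]'h) then pvLab (l[i]'h) (g (l[i]'h) + ((l.take i).count (l[i]'h)))
      else l[i]'h := by
  induction l generalizing d g i with
  | nil => simp at h
  | cons s t ih =>
    cases i with
    | zero =>
      by_cases hc : m.contains s = true
      · simp [pvEmitA, hc, hd s hc]
      · simp [pvEmitA, hc]
    | succ i =>
      have h' : i < t.length := by simpa using h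
      have hrec := ih (g := fun x => if x = s then g x + 1 else g x)
        (d := if m.contains s then d.insert s (d.getD s 0 + 1) else d)
        (by
          intro x hx
          by_cases hc : m.contains s = true
          · simp only [hc, if_true]
            by_cases hxs : x = s
            · subst hxs
              rw [PySem.Dict.getD_insert_self, hd x hx]
              simp
            · rw [PySem.Dict.getD_insert_of_ne, hd x hx]
              · simp [hxs]
              · exact hxs
          · have hcf : m.contains s = false := by simpa using hc
            have hxs : x ≠ s := by
              intro hh; subst hh; rw [hx] at hcf; exact absurd hcf (by simp)
            simp only [hcf, Bool.false_eq_true, if_false]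
            rw [hd x hx]
            simp [hxs])
        i h'
      simp only [pvEmitA, List.getElem_cons_succ]
      rw [hrec]
      have hc : (if (t[i]'h') = s then g (t[i]'h') + 1 else g (t[i]'h')) + (t.take i).count (t[i]'h')
           = g (t[i]'h') + (((s :: t).take (i+1)).count (t[i]'h')) := by
        rw [List.take_succ_cons, List.count_cons]
        by_cases hx : (t[i]'h') = s
        · rw [if_pos hx, if_pos (by simp [hx])]
          omega
        · rw [if_neg hx, if_neg (by simp only [beq_iff_eq]; exact fun hh => hx hh.symm)]
          omega
      rw [hc]

theorem pvEmitB_getElem (l : List String) (g : String → Nat) (d : PySem.Dict String Int)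
    (hd : ∀ s, d.getD s 0 = (g s : Int)) (i : Nat) (h : i < l.length) :
    (pvEmitB l d)[i]'(by simpa [pvEmitB_length] using h) =
      ((g (l[i]'h) + ((l.take i).count (l[i]'h)) : Nat) : Int) := by
  induction l generalizing d g i with
  | nil => simp at h
  | cons s t ih =>
    cases i with
    | zero => simp [pvEmitB, hd s]
    | succ i =>
      have h' : i < t.length := by simpa using h
      have hrec := ih (g := fun x => if x = s then g x + 1 else g x)
        (d := d.insert s (d.getD s 0 + 1))
        (by
          intro x
          by_cases hxs : x = s
          · subst hxs
            rw [PySem.Dict.getD_insert_self, hd x]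
            simp
          · rw [PySem.Dict.getD_insert_of_ne, hd x]
            · simp [hxs]
            · exact hxs)
        i h'
      simp only [pvEmitB, List.getElem_cons_succ]
      rw [hrec]
      have hc : (if (t[i]'h') = s then g (t[i]'h') + 1 else g (t[i]'h')) + (t.take i).count (t[i]'h')
           = g (t[i]'h') + (((s :: t).take (i+1)).count (t[i]'h')) := by
        rw [List.take_succ_cons, List.count_cons]
        by_cases hx : (t[i]'h') = s
        · rw [if_pos hx, if_pos (by simp [hx])]
          omega
        · rw [if_neg hx, if_neg (by simp only [beq_iff_eq]; exact fun hh => hx hh.symm)]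
          omega
      rw [hc]
-- A's multiples dict, named for the proofs (definitionally the port's)
def pvMultiples (l : List String) : PySem.Dict String Int :=
  ((PySem.Dict.counter l).items.filter (fun kv => kv.2 > 1)).foldl
    (fun d kv => d.insert kv.1 kv.2) PySem.Dict.empty

-- the common closed form of both else-branches
def pvCanon (l : List String) : List String :=
  l.mapIdx (fun i s => if 1 < List.count s l then pvLab s (List.count s (l.take i)) else s)

theorem pvMultiples_items (l : List String) :
    (pvMultiples l).items =
      ((PySem.Set.ofList l).filter (fun k => decide (1 < (List.count k l : Int)))).map
        (fun k => (k, (List.count k l : Int))) := by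
  unfold pvMultiples
  rw [PySem.Dict.items_counter, List.filter_map]
  rw [PySem.Dict.items_foldl_insert_fresh _ Prod.fst Prod.snd _
      (by intro a _; rfl)
      (by
        rw [List.map_map]
        have hid : (Prod.fst ∘ fun k : String => (k, (List.count k l : Int))) = id := by
          funext k; rfl
        rw [hid, List.map_id]
        exact (PySem.Set.nodup_ofList l).filter _)]
  simp [Function.comp_def, PySem.Dict.empty]

theorem pvMultiples_keys (l : List String) :
    (pvMultiples l).keys =
      (PySem.Set.ofList l).filter (fun k => decide (1 < (List.count k l : Int))) := by
  show ((pvMultiples l).items).map (fun p => p.1) = _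
  rw [pvMultiples_items, List.map_map]
  simp [Function.comp_def]

theorem pvMultiples_contains (l : List String) (s : String) :
    (pvMultiples l).contains s = true ↔ 1 < List.count s l := by
  rw [PySem.Dict.contains_iff_mem_keys, pvMultiples_keys, List.mem_filter]
  constructor
  · rintro ⟨-, hq⟩
    have := of_decide_eq_true hq
    exact_mod_cast this
  · intro h
    refine ⟨(PySem.Set.mem_ofList l s).mpr (List.count_pos_iff.mp (by omega)), ?_⟩
    simp
    exact_mod_cast h

theorem pvMultiples_size_zero (l : List String) :
    (pvMultiples l).size = 0 ↔ l.Nodup := by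
  show ((pvMultiples l).items).length = 0 ↔ _
  rw [pvMultiples_items, List.length_map, List.length_eq_zero_iff, List.filter_eq_nil_iff,
    List.nodup_iff_count]
  constructor
  · intro h a
    by_cases ha : a ∈ l
    · have := h a ((PySem.Set.mem_ofList l a).mpr ha)
      simp at this
      omega
    · have : List.count a l = 0 := List.count_eq_zero.mpr ha
      omega
  · intro h k _
    have := h k
    simp
    omega

theorem pvCount_split (l : List String) (i : Nat) (h : i < l.length) :
    List.count (l[i]'h) l =
      List.count (l[i]'h) (l.take i) + 1 + List.count (l[i]'h) (l.drop (i + 1)) := by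
  obtain ⟨a, ha⟩ : ∃ a, l[i]'h = a := ⟨_, rfl⟩
  rw [ha]
  have hsplit : l.drop i = a :: l.drop (i + 1) := by rw [← ha]; exact (List.getElem_cons_drop h).symm
  conv_lhs => rw [← List.take_append_drop i l]
  rw [List.count_append, hsplit, List.count_cons_self]
  omega
theorem pvRight_getElem (l : List String) (i : Nat) (h : i < l.length) :
    ((pvEmitB l.reverse PySem.Dict.empty).reverse)[i]'
        (by simpa [pvEmitB_length] using h) =
      (List.count (l[i]'h) (l.drop (i + 1)) : Int) := by
  have hr : l.reverse.length = l.length := by simp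
  have hn : (pvEmitB l.reverse PySem.Dict.empty).length = l.length := by
    rw [pvEmitB_length]; exact hr
  have hlt : i < (pvEmitB l.reverse PySem.Dict.empty).reverse.length := by
    rw [List.length_reverse, hn]; exact h
  apply Option.some.inj
  rw [← List.getElem?_eq_getElem hlt, List.getElem?_reverse (by omega), hn]
  have hjlt : l.length - 1 - i < (pvEmitB l.reverse PySem.Dict.empty).length := by omega
  rw [List.getElem?_eq_getElem hjlt]
  have hj' : l.length - 1 - i < l.reverse.length := by omega
  rw [pvEmitB_getElem l.reverse (fun _ => 0) PySem.Dict.empty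
      (fun s => PySem.Dict.getD_empty s 0) (l.length - 1 - i) hj']
  congr 1
  have hrev : l.reverse[l.length - 1 - i]'hj' = l[i]'h := by
    apply Option.some.inj
    rw [← List.getElem?_eq_getElem hj', List.getElem?_reverse (by omega),
      show l.length - 1 - (l.length - 1 - i) = i by omega, List.getElem?_eq_getElem h]
  have htake : l.reverse.take (l.length - 1 - i) = (l.drop (i + 1)).reverse := by
    rw [List.take_reverse, show l.length - (l.length - 1 - i) = i + 1 by omega]
  rw [hrev, htake, List.count_reverse]
  simp

theorem pvB_cond (l : List String) :
    ((pvEmitB l.reverse PySem.Dict.empty).reverse.all (fun k => k == 0)) = true ↔ l.Nodup := by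
  rw [List.all_reverse, List.all_eq_true, ← List.nodup_reverse]
  have hr : l.reverse.length = l.length := by simp
  have hlen : (pvEmitB l.reverse PySem.Dict.empty).length = l.reverse.length := pvEmitB_length _ _
  constructor
  · intro hall
    rw [List.nodup_iff_getElem?_ne_getElem?]
    intro i j hij hj heq
    have hi : i < l.reverse.length := lt_trans hij hj
    rw [List.getElem?_eq_getElem hi, List.getElem?_eq_getElem hj] at heq
    have heq' : l.reverse[i]'hi = l.reverse[j]'hj := by simpa using heq
    have hmem : (pvEmitB l.reverse PySem.Dict.empty)[j]'(by omega) ∈ pvEmitB l.reverse PySem.Dict.empty :=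
      List.getElem_mem _
    have hz := hall _ hmem
    rw [pvEmitB_getElem l.reverse (fun _ => 0) PySem.Dict.empty
        (fun s => PySem.Dict.getD_empty s 0) j hj] at hz
    have hzz : List.count (l.reverse[j]'hj) (l.reverse.take j) = 0 := by
      simpa using hz
    have hmemtake : l.reverse[j]'hj ∈ l.reverse.take j := by
      rw [List.mem_iff_getElem]
      refine ⟨i, ?_, ?_⟩
      · rw [List.length_take]; omega
      · rw [List.getElem_take]; exact heq'
    exact absurd hmemtake (List.count_eq_zero.mp hzz)
  · intro hnd x hx
    obtain ⟨j, hj, rfl⟩ := List.mem_iff_getElem.mp hx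
    have hj' : j < l.reverse.length := by omega
    rw [pvEmitB_getElem l.reverse (fun _ => 0) PySem.Dict.empty
        (fun s => PySem.Dict.getD_empty s 0) j hj']
    have hcnt : List.count (l.reverse[j]'hj') (l.reverse.take j) = 0 := by
      rw [List.count_eq_zero]
      intro hmem
      obtain ⟨i, hi, hieq⟩ := List.mem_iff_getElem.mp hmem
      have hi' : i < j := by rw [List.length_take] at hi; omega
      rw [List.getElem_take] at hieq
      rw [List.nodup_iff_getElem?_ne_getElem?] at hnd
      exact hnd i j hi' hj' (by
        rw [List.getElem?_eq_getElem (show i < l.reverse.length by omega),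
          List.getElem?_eq_getElem hj', hieq])
    rw [hcnt]
    simp
theorem pvFoldA (m : PySem.Dict String Int) (l : List String)
    (d : PySem.Dict String Int) (acc : List String) :
    (l.foldl
        (fun (st : PySem.Dict String Int × List String) s =>
          if m.contains s then
            (st.1.insert s (st.1.getD s 0 + 1),
             st.2 ++ [s ++ (Char.ofNat ('a'.toNat + (st.1.getD s 0).toNat)).toString])
          else (st.1, st.2 ++ [s]))
        (d, acc)).2 = acc ++ pvEmitA m l d := by
  induction l generalizing d acc with
  | nil => simp [pvEmitA]
  | cons s t ih =>
    rw [List.foldl_cons]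
    by_cases h : m.contains s = true
    · show (List.foldl _ (if m.contains s = true then
            (d.insert s (d.getD s 0 + 1),
             acc ++ [s ++ (Char.ofNat ('a'.toNat + (d.getD s 0).toNat)).toString])
          else (d, acc ++ [s])) t).2 = _
      rw [if_pos h, ih]
      simp [pvEmitA, h, pvLab]
    · show (List.foldl _ (if m.contains s = true then
            (d.insert s (d.getD s 0 + 1),
             acc ++ [s ++ (Char.ofNat ('a'.toNat + (d.getD s 0).toNat)).toString])
          else (d, acc ++ [s])) t).2 = _
      rw [if_neg h, ih]
      simp [pvEmitA, h]

theorem pvFoldB2 (l : List String) (d : PySem.Dict String Int) (acc : List Int) :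
    (l.foldl
        (fun (st : PySem.Dict String Int × List Int) s =>
          (st.1.insert s (st.1.getD s 0 + 1), st.2 ++ [st.1.getD s 0]))
        (d, acc)).2 = acc ++ pvEmitB l d := by
  induction l generalizing d acc with
  | nil => simp [pvEmitB]
  | cons s t ih => simp [pvEmitB, ih]

theorem pvFoldB1 (l : List String) (d : PySem.Dict String Int) (acc : List Int) :
    (l.foldl
        (fun (st : PySem.Dict String Int × List Int) s =>
          (st.1.insert s (st.1.getD s 0 + 1), st.2 ++ [st.1.getD s 0]))
        (d, acc)).1 = l.foldl (fun d s => d.insert s (d.getD s 0 + 1)) d := by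
  induction l generalizing d acc with
  | nil => rfl
  | cons s t ih => simp [ih]

theorem pvPortA_eq (l : List String) :
    disambiguate_repeats l = if l.Nodup then l else pvCanon l := by
  show (if (pvMultiples l).size = 0 then l
        else (l.foldl (fun (st : PySem.Dict String Int × List String) s =>
          if (pvMultiples l).contains s then
            (st.1.insert s (st.1.getD s 0 + 1),
             st.2 ++ [s ++ (Char.ofNat ('a'.toNat + (st.1.getD s 0).toNat)).toString])
          else (st.1, st.2 ++ [s])) (PySem.Dict.empty, [])).2) = _
  rw [pvFoldA, List.nil_append]
  refine if_congr (pvMultiples_size_zero l) rfl ?_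
  apply List.ext_getElem
  · rw [pvEmitA_length]; simp [pvCanon]
  · intro i h1 h2
    have h : i < l.length := by rwa [pvEmitA_length] at h1
    rw [pvEmitA_getElem (pvMultiples l) l (fun _ => 0) PySem.Dict.empty
        (fun s _ => PySem.Dict.getD_empty s 0) i h]
    simp only [pvCanon, List.getElem_mapIdx]
    rcases em (1 < List.count (l[i]'h) l) with hm | hm
    · rw [if_pos ((pvMultiples_contains l _).mpr hm), if_pos hm]
      norm_num
    · rw [if_neg (fun hc => hm ((pvMultiples_contains l _).mp hc)), if_neg hm]

theorem pvPortB_eq (l : List String) :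
    disambiguate_repeats_alt l = if l.Nodup then l else pvCanon l := by
  show (if ((l.reverse.foldl
          (fun (st : PySem.Dict String Int × List Int) s =>
            (st.1.insert s (st.1.getD s 0 + 1), st.2 ++ [st.1.getD s 0]))
          (PySem.Dict.empty, [])).2.reverse.all (fun k => k == 0)) then l
        else
          (l.zip (l.reverse.foldl
          (fun (st : PySem.Dict String Int × List Int) s =>
            (st.1.insert s (st.1.getD s 0 + 1), st.2 ++ [st.1.getD s 0]))
          (PySem.Dict.empty, [])).2.reverse).map (fun p =>
            if (l.reverse.foldl
          (fun (st : PySem.Dict String Int × List Int) s =>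
            (st.1.insert s (st.1.getD s 0 + 1), st.2 ++ [st.1.getD s 0]))
          (PySem.Dict.empty, [])).1.getD p.1 0 > 1 then
              p.1 ++ (Char.ofNat ('a'.toNat + ((l.reverse.foldl
          (fun (st : PySem.Dict String Int × List Int) s =>
            (st.1.insert s (st.1.getD s 0 + 1), st.2 ++ [st.1.getD s 0]))
          (PySem.Dict.empty, [])).1.getD p.1 0 - 1 - p.2).toNat)).toString
            else p.1)) = _
  rw [pvFoldB1, pvFoldB2, List.nil_append]
  simp only [PySem.Dict.getD_foldl_insert_add_one, PySem.Dict.getD_empty, List.count_reverse,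
    zero_add]
  refine if_congr (by exact_mod_cast pvB_cond l) rfl ?_
  apply List.ext_getElem
  · rw [List.length_map, List.length_zip, List.length_reverse, pvEmitB_length,
      List.length_reverse]
    simp [pvCanon]
  · intro i h1 h2
    have h : i < l.length := by
      rw [List.length_map, List.length_zip, List.length_reverse, pvEmitB_length,
        List.length_reverse] at h1
      omega
    rw [List.getElem_map, List.getElem_zip, pvRight_getElem l i h]
    simp only [pvCanon, List.getElem_mapIdx]
    have hsplit := pvCount_split l i h
    rcases em (1 < List.count (l[i]'h) l) with hm | hm
    · rw [if_pos (show ((List.count (l[i]'h) l : Int) > 1) by exact_mod_cast hm), if_pos hm]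
      have harg : ((List.count (l[i]'h) l : Int) - 1 -
          (List.count (l[i]'h) (l.drop (i + 1)) : Int)).toNat = List.count (l[i]'h) (l.take i) := by
        omega
      rw [pvLab, harg]
    · rw [if_neg (show ¬((List.count (l[i]'h) l : Int) > 1) from
          fun hc => hm (by exact_mod_cast hc)), if_neg hm]

-- ===== VERDICT (by name: the statement is the Claim_ definition above) =====
theorem disambiguate_repeats_spec : Claim_equal_disambiguate_repeats := by
  intro treated _
  unfold Spec_disambiguate_repeats
  rw [pvPortA_eq, pvPortB_eq]
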